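-- pv_equiv track=rewrite | github.com/pedrolalala/Lucenera-Power-point | pdf_parser.py | extrair_marca_da_referencia
-- ===== SOURCE A (Python) =====
-- def extrair_marca_da_referencia(referencia: str) -> str:
--     """
--     Tenta identificar a marca baseado no prefixo da referência
--
--     Exemplos:
--     - STH8536/30 -> STELLATECH (prefixo STH)
--     - STL24845/27 -> STELLATECH (prefixo STL)
--     - BL1074DR-BMPM -> Sem marca identificada
--     - EKPF32 -> EKLART (prefixo EK)
--     """
--     referencia_upper = referencia.upper()
--
--     # Mapeamento de prefixos comuns
--     prefixos_marca = {
--         'STH': 'STELLATECH',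
--         'STL': 'STELLATECH',
--         'EK': 'EKLART',
--         'LUC': 'LUCENERA',
--         'BL': 'INTERLIGHT',
--         'IL': 'ILUMINAR',
--         'EV': 'EVOLED',
--         'DS': 'DESSINE',
--         'DR': 'DRESSALL',
--         'AL': 'ALPERTONE'
--     }
--
--     for prefixo, marca in prefixos_marca.items():
--         if referencia_upper.startswith(prefixo):
--             return marca
--
--     return 'LUCENERA'  # Marca padrão se não identificar
-- ===== SOURCE B (Python) =====
-- # Idiomatic re-implementation: constant-time dict lookups on the 3- and 2-char
-- # prefixes of the uppercased reference, instead of a linear startswith scan.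
-- _MARCAS_3 = {'STH': 'STELLATECH', 'STL': 'STELLATECH', 'LUC': 'LUCENERA'}
-- _MARCAS_2 = {'EK': 'EKLART', 'BL': 'INTERLIGHT', 'IL': 'ILUMINAR',
--              'EV': 'EVOLED', 'DS': 'DESSINE', 'DR': 'DRESSALL', 'AL': 'ALPERTONE'}
--
-- def extrair_marca_da_referencia(referencia: str) -> str:
--     ref = referencia.upper()
--     marca = _MARCAS_3.get(ref[:3])
--     if marca is not None:
--         return marca
--     return _MARCAS_2.get(ref[:2], 'LUCENERA')
-- ===== Notes on version B (the rewrite author's own statement) =====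
-- stated objective: idiomatic
-- what changed: Replaces the linear scan of startswith tests over all ten prefixes with two precomputed dicts keyed by prefix length, looked up by slicing the first 3 and then the first 2 characters of the uppercased reference.
import Mathlib
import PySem

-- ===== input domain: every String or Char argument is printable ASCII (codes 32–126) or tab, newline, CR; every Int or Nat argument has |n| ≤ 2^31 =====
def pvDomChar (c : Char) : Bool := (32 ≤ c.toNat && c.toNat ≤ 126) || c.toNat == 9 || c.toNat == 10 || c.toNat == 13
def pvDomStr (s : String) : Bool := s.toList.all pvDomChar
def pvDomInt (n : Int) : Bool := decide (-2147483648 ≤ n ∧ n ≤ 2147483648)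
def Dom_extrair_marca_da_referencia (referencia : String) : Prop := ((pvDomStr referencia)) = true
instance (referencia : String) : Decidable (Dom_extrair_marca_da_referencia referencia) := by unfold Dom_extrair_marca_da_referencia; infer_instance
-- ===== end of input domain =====

-- B replaces A's linear startswith scan over ten prefixes by two dict lookups keyed on the
-- first 3 / first 2 characters of the uppercased reference (idiomatic; same result).


-- ===== PORT A =====
-- A's dict literal 'prefixos_marca', in insertion order
def pvPrefixosMarca : List (String × String) :=
  [("STH", "STELLATECH"), ("STL", "STELLATECH"), ("EK", "EKLART"),
   ("LUC", "LUCENERA"), ("BL", "INTERLIGHT"), ("IL", "ILUMINAR"),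
   ("EV", "EVOLED"), ("DS", "DESSINE"), ("DR", "DRESSALL"), ("AL", "ALPERTONE")]

-- A's 'for prefixo, marca in …: if startswith: return marca' loop, then the default
def pvMarcaLoop (referencia_upper : String) : List (String × String) → String
  | [] => "LUCENERA"
  | (prefixo, marca) :: rest =>
      if PySem.Str.startswith referencia_upper prefixo then marca
      else pvMarcaLoop referencia_upper rest

def extrair_marca_da_referencia (referencia : String) : String :=
  let referencia_upper := PySem.Str.upper referencia
  pvMarcaLoop referencia_upper pvPrefixosMarca

-- ===== PORT B =====
def pvMarcas3 : PySem.Dict String String :=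
  PySem.Dict.mk [("STH", "STELLATECH"), ("STL", "STELLATECH"), ("LUC", "LUCENERA")]
def pvMarcas2 : PySem.Dict String String :=
  PySem.Dict.mk [("EK", "EKLART"), ("BL", "INTERLIGHT"), ("IL", "ILUMINAR"),
    ("EV", "EVOLED"), ("DS", "DESSINE"), ("DR", "DRESSALL"), ("AL", "ALPERTONE")]

def extrair_marca_da_referencia_alt (referencia : String) : String :=
  let ref := PySem.Str.upper referencia
  match pvMarcas3.get? (PySem.Str.slice ref none (some 3)) with
  | some marca => marca
  | none => (pvMarcas2.get? (PySem.Str.slice ref none (some 2))).getD "LUCENERA"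

-- ===== PRECONDITION & SPEC =====
def Spec_extrair_marca_da_referencia (referencia : String) (out : String) : Prop := out = extrair_marca_da_referencia_alt referencia
instance (referencia : String) (out : String) : Decidable (Spec_extrair_marca_da_referencia referencia out) := by unfold Spec_extrair_marca_da_referencia; infer_instance

-- ===== CLAIM (what is proved, stated in full; the proofs are below) =====
def Claim_equal_extrair_marca_da_referencia : Prop := ∀ (referencia : String), Dom_extrair_marca_da_referencia referencia → Spec_extrair_marca_da_referencia referencia (extrair_marca_da_referencia referencia)

-- ===== LEMMAS AND PROOFS =====

-- the scan and the length-keyed lookups agree on EVERY string (applied to the uppercased one)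
set_option maxHeartbeats 2000000 in
lemma pvCore_eq (u : String) :
    pvMarcaLoop u pvPrefixosMarca =
      (match pvMarcas3.get? (PySem.Str.slice u none (some 3)) with
       | some marca => marca
       | none => (pvMarcas2.get? (PySem.Str.slice u none (some 2))).getD "LUCENERA") := by
  have e1 : ("STH" : String).toList = ['S','T','H'] := rfl
  have e2 : ("STL" : String).toList = ['S','T','L'] := rfl
  have e3 : ("LUC" : String).toList = ['L','U','C'] := rfl
  have f1 : ("EK" : String).toList = ['E','K'] := rfl
  have f2 : ("BL" : String).toList = ['B','L'] := rfl
  have f3 : ("IL" : String).toList = ['I','L'] := rfl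
  have f4 : ("EV" : String).toList = ['E','V'] := rfl
  have f5 : ("DS" : String).toList = ['D','S'] := rfl
  have f6 : ("DR" : String).toList = ['D','R'] := rfl
  have f7 : ("AL" : String).toList = ['A','L'] := rfl
  have l3 : (['S','T','H'] : List Char).length = 3 := rfl
  have l3' : (['S','T','L'] : List Char).length = 3 := rfl
  have l3'' : (['L','U','C'] : List Char).length = 3 := rfl
  have l2a : (['E','K'] : List Char).length = 2 := rfl
  have l2b : (['B','L'] : List Char).length = 2 := rfl
  have l2c : (['I','L'] : List Char).length = 2 := rfl
  have l2d : (['E','V'] : List Char).length = 2 := rfl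
  have l2e : (['D','S'] : List Char).length = 2 := rfl
  have l2f : (['D','R'] : List Char).length = 2 := rfl
  have l2g : (['A','L'] : List Char).length = 2 := rfl
  have hsl : ∀ (k : Nat), (PySem.Str.slice u none (some (k : Int))).toList = u.toList.take k := by
    intro k; simp [pysem, PySem.List.slice_to_natCast]
  have hsl3 : (PySem.Str.slice u none (some 3)).toList = u.toList.take 3 := by
    have := hsl 3; norm_num at this ⊢; exact this
  have hsl2 : (PySem.Str.slice u none (some 2)).toList = u.toList.take 2 := by
    have := hsl 2; norm_num at this ⊢; exact this
  have hnil3 : (PySem.Dict.mk ([] : List (String × String))).get? (PySem.Str.slice u none (some 3)) = none := rfl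
  have hnil2 : (PySem.Dict.mk ([] : List (String × String))).get? (PySem.Str.slice u none (some 2)) = none := rfl
  -- the only cross-order interaction: a string cannot start with both 'EK' and 'LUC'
  have hEKLUC : ¬(['E','K'] = List.take 2 u.toList ∧ ['L','U','C'] = List.take 3 u.toList) := by
    rintro ⟨h1, h2⟩
    have h : List.take 2 (List.take 3 u.toList) = List.take 2 u.toList := by
      simp [List.take_take]
    rw [← h2, ← h1] at h
    simp at h
  simp only [pvMarcaLoop, pvPrefixosMarca, pvMarcas3, pvMarcas2, PySem.Dict.get?_mk_cons, hnil3, hnil2]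
  simp only [beq_iff_eq, ← String.toList_inj]
  simp only [pysem, List.prefix_iff_eq_take, hsl3, hsl2,
    e1, e2, e3, f1, f2, f3, f4, f5, f6, f7,
    l3, l3', l3'', l2a, l2b, l2c, l2d, l2e, l2f, l2g]
  split_ifs <;>
    first
      | rfl
      | (exact absurd ⟨by assumption, by assumption⟩ hEKLUC)

-- ===== VERDICT (by name: the statement is the Claim_ definition above) =====
theorem extrair_marca_da_referencia_spec : Claim_equal_extrair_marca_da_referencia := by
  intro referencia _
  unfold Spec_extrair_marca_da_referencia extrair_marca_da_referencia extrair_marca_da_referencia_alt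
  exact pvCore_eq (PySem.Str.upper referencia)
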